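-- pv_equiv track=rewrite | github.com/Sdas08217/LeetCode | Oct_2024/Oct_25.py | removeSubfolders
-- ===== SOURCE A (Python) =====
-- from typing import List
--
-- def removeSubfolders(folder: List[str]) -> List[str]:
--     folder.sort()  # Sort folders lexicographically
--     result = []
--
--     # Add the first folder to the result list
--     result.append(folder[0])
--
--     for i in range(1, len(folder)):
--         # Check if the current folder is a sub-folder of the last folder in the result
--         if not folder[i].startswith(result[-1] + "/"):
--             result.append(folder[i])  # Add to result if it's not a sub-folder
--
--     return result
-- ===== SOURCE B (Python) =====
-- def removeSubfolders(folder):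
--     folder.sort()  # same in-place sort as A
--     # Global index pass: a folder p is a "parent" iff its immediate successor in
--     # sorted order lies under p (then, by sortedness, everything under p is a
--     # contiguous block starting right after p).  Collect those prefixes once,
--     # then filter the tail against them -- no sequential last-kept state.
--     prefixes = [a + "/" for a, b in zip(folder, folder[1:]) if b.startswith(a + "/")]
--     return [folder[0]] + [x for x in folder[1:]
--                           if not any(x.startswith(p) for p in prefixes)]
-- ===== Notes on version B (the rewrite author's own statement) =====
-- stated objective: alternative
-- what changed: Replaces A's sequential greedy (compare each folder to the last kept result element) with a staged global-index algorithm: one zip pass over adjacent sorted pairs collects the set of parent prefixes a+'/' (a is a parent iff its immediate successor lies under it), then the tail is filtered against that global prefix set with no last-kept state.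
import Mathlib
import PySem

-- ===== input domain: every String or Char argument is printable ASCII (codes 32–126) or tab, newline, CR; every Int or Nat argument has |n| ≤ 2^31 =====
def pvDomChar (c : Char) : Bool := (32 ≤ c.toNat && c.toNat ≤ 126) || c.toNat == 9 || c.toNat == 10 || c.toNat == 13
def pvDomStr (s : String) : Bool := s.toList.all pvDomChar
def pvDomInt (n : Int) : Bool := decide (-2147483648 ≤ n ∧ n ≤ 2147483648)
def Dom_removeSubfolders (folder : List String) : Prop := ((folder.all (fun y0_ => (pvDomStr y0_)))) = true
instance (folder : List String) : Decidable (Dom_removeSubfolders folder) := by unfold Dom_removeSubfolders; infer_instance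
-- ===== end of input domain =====

-- B replaces A's sequential greedy (compare each folder with the last kept result
-- element) by a staged global algorithm: collect the parent prefixes a ++ "/" from
-- adjacent sorted pairs in one pass, then filter the tail against that global list.
-- Both versions sort the argument list in place; the claim is about the return value.

-- ===== PORT A =====
-- A's loop body: append folder x unless it starts with result[-1] + "/".
def aStep (res : List String) (x : String) : List String :=
  if !(PySem.Str.startswith x (PySem.List.pyGetD res (-1) "" ++ "/")) then res ++ [x] else res

def removeSubfolders (folder : List String) : List String :=
  let f := PySem.List.sorted folder (fun x => x) false
  -- result = [folder[0]]; A raises IndexError here on [], which Pre_ excludes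
  let result : List String := [PySem.List.pyGetD f 0 ""]
  (PySem.List.pyRange 1 (f.length : Int) 1).foldl
    (fun res i => aStep res (PySem.List.pyGetD f i "")) result

-- ===== PORT B =====
-- prefixes = [a + "/" for a, b in zip(folder, folder[1:]) if b.startswith(a + "/")]
def altPrefixes (f : List String) : List String :=
  (f.zip (f.drop 1)).filterMap (fun ab =>
    if PySem.Str.startswith ab.2 (ab.1 ++ "/") then some (ab.1 ++ "/") else none)

def removeSubfolders_alt (folder : List String) : List String :=
  let f := PySem.List.sorted folder (fun x => x) false
  let prefixes := altPrefixes f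
  -- [folder[0]] + [x for x in folder[1:] if not any(x.startswith(p) for p in prefixes)]
  PySem.List.pyGetD f 0 "" ::
    (f.drop 1).filter (fun x => !(prefixes.any (fun p => PySem.Str.startswith x p)))

-- ===== PRECONDITION & SPEC =====
-- A raises IndexError (folder[0]) on the empty list; Pre_ excludes exactly that input.
def Pre_removeSubfolders (folder : List String) : Prop := folder ≠ []
instance (folder : List String) : Decidable (Pre_removeSubfolders folder) := by
  unfold Pre_removeSubfolders; infer_instance

def pvWitness_removeSubfolders : List String := ["/a", "/a/b", "/c"]

def Spec_removeSubfolders (folder : List String) (out : List String) : Prop := out = removeSubfolders_alt folder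
instance (folder : List String) (out : List String) : Decidable (Spec_removeSubfolders folder out) := by unfold Spec_removeSubfolders; infer_instance

-- ===== CLAIM (what is proved, stated in full; the proofs are below) =====
def Claim_equal_removeSubfolders : Prop := ∀ (folder : List String), Dom_removeSubfolders folder → Pre_removeSubfolders folder → Spec_removeSubfolders folder (removeSubfolders folder)

-- ===== LEMMAS AND PROOFS =====

-- Intermediate form shared by both sides: keep the head, drop the contiguous run of
-- its subfolders, recurse.
def goRS : List String → List String
  | [] => []
  | h :: t =>
    h :: goRS (t.dropWhile (fun s => PySem.Str.startswith s (h ++ "/")))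
termination_by l => l.length
decreasing_by
  simpa using Nat.lt_succ_of_le (List.length_dropWhile_le _ t)

-- ---- A = goRS ∘ sorted -------------------------------------------------------

-- What A's loop appends after the result so far, whose last element is `last`.
def aExtra (last : String) : List String → List String
  | [] => []
  | x :: t =>
    if PySem.Str.startswith x (last ++ "/") then aExtra last t else x :: aExtra x t

lemma foldl_aStep (l : List String) : ∀ (r : List String) (last : String),
    l.foldl aStep (r ++ [last]) = (r ++ [last]) ++ aExtra last l := by
  induction l with
  | nil => intro r last; simp [aExtra]
  | cons x t ih =>
    intro r last
    by_cases h : PySem.Str.startswith x (last ++ "/") = true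
    all_goals simp at h
    · simp [List.foldl_cons, aStep, aExtra, PySem.List.pyGetD_neg_one_append_singleton, h,
        ih r last]
    · have hx := ih (r ++ [last]) x
      simp only [List.append_assoc, List.cons_append, List.nil_append] at hx
      simp [List.foldl_cons, aStep, aExtra, PySem.List.pyGetD_neg_one_append_singleton, h, hx]

lemma aExtra_eq_go (l : List String) : ∀ (last : String),
    aExtra last l = goRS (l.dropWhile (fun s => PySem.Str.startswith s (last ++ "/"))) := by
  induction l with
  | nil => intro last; simp [aExtra, goRS]
  | cons x t ih =>
    intro last
    by_cases h : PySem.Str.startswith x (last ++ "/") = true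
    all_goals simp at h
    · simp [aExtra, h, ih last]
    · simp only [aExtra, List.dropWhile_cons]
      rw [if_neg (by simp [h]), if_neg (by simp [h]), goRS, ih x]

-- ---- order toolbox (lexicographic order, prefixes) ---------------------------

lemma prefix_lt_of_ne : ∀ (p s : List Char), p <+: s → p ≠ s → p < s := by
  intro p
  induction p with
  | nil =>
    intro s _ hne
    cases s with
    | nil => exact absurd rfl hne
    | cons a t => exact List.Lex.nil
  | cons c p' ih =>
    intro s hp hne
    obtain ⟨t, rfl⟩ := hp
    cases t with
    | nil => simp at hne
    | cons d t' =>
      exact List.Lex.cons (ih (p' ++ d :: t') ⟨_, rfl⟩ (by simp))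

lemma le_of_prefix {p s : List Char} (h : p <+: s) : p ≤ s := by
  by_cases he : p = s
  · exact le_of_eq he
  · exact le_of_lt (prefix_lt_of_ne p s h he)

lemma prefix_convex : ∀ (q u s x : List Char), q <+: u → q <+: x → u ≤ s → s ≤ x → q <+: s := by
  intro q
  induction q with
  | nil => intro u s x _ _ _ _; exact List.nil_prefix
  | cons c q' ih =>
    intro u s x hu hx h1 h2
    obtain ⟨u', rfl⟩ := hu
    obtain ⟨x', rfl⟩ := hx
    cases s with
    | nil =>
      exfalso
      have : ([] : List Char) < c :: (q' ++ u') := List.Lex.nil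
      exact absurd h1 (not_le.mpr this)
    | cons d s' =>
      rcases lt_trichotomy d c with hdc | hdc | hdc
      · exfalso
        have : d :: s' < c :: (q' ++ u') := List.Lex.rel hdc
        exact absurd h1 (not_le.mpr this)
      · subst hdc
        have h1' : q' ++ u' ≤ s' := by
          by_contra hc
          have : s' < q' ++ u' := not_le.mp hc
          have : d :: s' < d :: (q' ++ u') := List.Lex.cons this
          exact absurd h1 (not_le.mpr this)
        have h2' : s' ≤ q' ++ x' := by
          by_contra hc
          have : q' ++ x' < s' := not_le.mp hc
          have : d :: (q' ++ x') < d :: s' := List.Lex.cons this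
          exact absurd h2 (not_le.mpr this)
        exact List.cons_prefix_cons.mpr ⟨rfl, ih (q' ++ u') s' (q' ++ x') ⟨_, rfl⟩ ⟨_, rfl⟩ h1' h2'⟩
      · exfalso
        have : c :: (q' ++ x') < d :: s' := List.Lex.rel hdc
        exact absurd h2 (not_le.mpr this)

lemma sw_iff (s p : String) :
    PySem.Str.startswith s p = true ↔ p.toList <+: s.toList := by
  simp [PySem.Str.startswith_eq, PySem.Chars.startswith_iff]

lemma sw_le {s p : String} (h : PySem.Str.startswith s p = true) : p ≤ s :=
  String.le_iff_toList_le.mpr (le_of_prefix ((sw_iff s p).mp h))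

lemma sw_slash_lt {x a : String} (h : PySem.Str.startswith x (a ++ "/") = true) : a < x := by
  have hp : (a ++ "/").toList <+: x.toList := (sw_iff _ _).mp h
  have hp' : a.toList <+: x.toList := by
    refine List.IsPrefix.trans ?_ hp
    simp
  rw [String.lt_iff_toList_lt]
  refine prefix_lt_of_ne _ _ hp' ?_
  intro he
  have := hp.length_le
  simp [← he] at this

lemma sw_trans {x b a : String} (hb : PySem.Str.startswith b (a ++ "/") = true)
    (hx : PySem.Str.startswith x (b ++ "/") = true) :
    PySem.Str.startswith x (a ++ "/") = true := by
  rw [sw_iff] at hb hx ⊢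
  refine List.IsPrefix.trans hb (List.IsPrefix.trans ?_ hx)
  simp

lemma sw_convex {u s x : String} (q : String)
    (hu : PySem.Str.startswith u q = true) (hx : PySem.Str.startswith x q = true)
    (h1 : u ≤ s) (h2 : s ≤ x) : PySem.Str.startswith s q = true := by
  rw [sw_iff] at hu hx ⊢
  exact prefix_convex q.toList u.toList s.toList x.toList hu hx
    (String.le_iff_toList_le.mp h1) (String.le_iff_toList_le.mp h2)

lemma sw_refl (s : String) : PySem.Str.startswith s s = true := by
  rw [sw_iff]

-- ---- adjacent pairs ----------------------------------------------------------

def pairsRS (l : List String) : List (String × String) := l.zip (l.drop 1)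

lemma pairsRS_cons_cons (h b : String) (t : List String) :
    pairsRS (h :: b :: t) = (h, b) :: pairsRS (b :: t) := rfl

lemma mem_pairsRS_cons {a b c : String} {l : List String}
    (h : (a, b) ∈ pairsRS l) : (a, b) ∈ pairsRS (c :: l) := by
  cases l with
  | nil => simp [pairsRS] at h
  | cons d l' => rw [pairsRS_cons_cons]; exact List.mem_cons_of_mem _ h

lemma mem_pairsRS_suffix {a b : String} {v : List String} :
    ∀ (w : List String), (a, b) ∈ pairsRS v → (a, b) ∈ pairsRS (w ++ v) := by
  intro w
  induction w with
  | nil => intro h; simpa using h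
  | cons c w' ih => intro h; exact mem_pairsRS_cons (ih h)

lemma mem_of_mem_pairsRS {a b : String} {l : List String}
    (h : (a, b) ∈ pairsRS l) : a ∈ l ∧ b ∈ l := by
  have := List.of_mem_zip h
  exact ⟨this.1, List.mem_of_mem_drop this.2⟩

lemma mem_pairsRS_append {a b : String} {v : List String} :
    ∀ (w : List String), (a, b) ∈ pairsRS (w ++ v) →
      (a, b) ∈ pairsRS v ∨ (a ∈ w ∧ (b ∈ w ∨ b ∈ v.take 1)) := by
  intro w
  induction w with
  | nil => intro h; exact Or.inl (by simpa using h)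
  | cons c w' ih =>
    intro h
    rcases hL : w' ++ v with _ | ⟨d, L'⟩
    · rw [List.cons_append, hL] at h
      simp [pairsRS] at h
    · rw [List.cons_append, hL, pairsRS_cons_cons, ← hL] at h
      rcases List.mem_cons.mp h with he | hm
      · have hab : a = c ∧ b = d := by
          have := Prod.mk.injEq a b c d ▸ he
          exact ⟨congrArg Prod.fst he, congrArg Prod.snd he⟩
        refine Or.inr ⟨by simp [hab.1], ?_⟩
        cases w' with
        | nil =>
          simp at hL
          right
          simp [hL, hab.2]
        | cons e w'' =>
          left
          have : d = e := by
            have := congrArg (fun l => l.head?) hL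
            simp at this
            exact this.symm
          simp [hab.2, this]
      · rcases ih hm with h1 | ⟨h2, h3⟩
        · exact Or.inl h1
        · exact Or.inr ⟨List.mem_cons_of_mem _ h2,
            h3.imp (List.mem_cons_of_mem _) id⟩

-- ---- the B-side predicate ----------------------------------------------------

def covB (l : List String) (x : String) : Bool :=
  (altPrefixes l).any (fun p => PySem.Str.startswith x p)

lemma covB_iff (l : List String) (x : String) :
    covB l x = true ↔ ∃ a b, (a, b) ∈ pairsRS l ∧
      PySem.Str.startswith b (a ++ "/") = true ∧
      PySem.Str.startswith x (a ++ "/") = true := by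
  simp only [covB, altPrefixes, List.any_eq_true, List.mem_filterMap, pairsRS]
  constructor
  · rintro ⟨p, ⟨⟨a, b⟩, hm, hif⟩, hx⟩
    by_cases hc : PySem.Str.startswith b (a ++ "/") = true
    · rw [if_pos hc] at hif
      exact ⟨a, b, hm, hc, by rw [Option.some.injEq] at hif; rw [hif]; exact hx⟩
    · rw [if_neg hc] at hif; cases hif
  · rintro ⟨a, b, hm, hb, hx⟩
    exact ⟨a ++ "/", ⟨(a, b), hm, by rw [if_pos hb]⟩, hx⟩

lemma dropWhile_cons_head_false {p : String → Bool} :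
    ∀ {l : List String} {v0 : String} {v' : List String},
      l.dropWhile p = v0 :: v' → p v0 = false := by
  intro l
  induction l with
  | nil => intro v0 v' h; simp at h
  | cons a l ih =>
    intro v0 v' h
    rw [List.dropWhile_cons] at h
    by_cases hp : p a
    · rw [if_pos hp] at h; exact ih h
    · rw [if_neg hp] at h
      injection h with h1 h2
      rw [← h1]
      simpa using hp

-- ---- goRS = head :: global filter, on a sorted list --------------------------

lemma go_eq_filter : ∀ (n : Nat) (h : String) (t : List String),
    (h :: t).length ≤ n → (h :: t).Pairwise (· ≤ ·) →
    goRS (h :: t) = h :: t.filter (fun x => !(covB (h :: t) x)) := by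
  intro n
  induction n with
  | zero => intro h t hlen _; simp at hlen
  | succ n ih =>
    intro h t hlen hpw
    have h_le : ∀ x ∈ t, h ≤ x := (List.pairwise_cons.mp hpw).1
    have pw_t : t.Pairwise (· ≤ ·) := (List.pairwise_cons.mp hpw).2
    set P : String → Bool := fun s => PySem.Str.startswith s (h ++ "/") with hP
    have hsplit : t.takeWhile P ++ t.dropWhile P = t := List.takeWhile_append_dropWhile
    set u := t.takeWhile P with hu_def
    set v := t.dropWhile P with hv_def
    have hu : ∀ x ∈ u, P x = true := fun x hx => List.mem_takeWhile_imp hx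
    have pw_uv := (List.pairwise_append.mp (hsplit ▸ pw_t))
    have pv : v.Pairwise (· ≤ ·) := pw_uv.2.1
    have huv : ∀ a ∈ u, ∀ b ∈ v, a ≤ b := pw_uv.2.2
    -- C1: every element of u is covered
    have C1 : ∀ x ∈ u, covB (h :: t) x = true := by
      intro x hx
      rcases hu0 : u with _ | ⟨u0, u'⟩
      · rw [hu0] at hx; simp at hx
      · have ht0 : t = u0 :: (u' ++ v) := by rw [← hsplit, hu0]; rfl
        have hpair : (h, u0) ∈ pairsRS (h :: t) := by
          rw [ht0, pairsRS_cons_cons]; exact List.mem_cons_self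
        refine (covB_iff _ _).mpr ⟨h, u0, hpair, ?_, ?_⟩
        · exact hu u0 (by rw [hu0]; exact List.mem_cons_self)
        · exact hu x hx
    rcases hv : v with _ | ⟨v0, v'⟩
    · -- t = u, everything is filtered out
      have ht : t = u := by rw [← hsplit, hv]; simp
      have hgo : goRS (h :: t) = h :: goRS v := by rw [goRS]
      rw [hgo, hv]
      have hf : List.filter (fun x => !covB (h :: t) x) t = [] :=
        List.filter_eq_nil_iff.mpr (fun x hx => by simp [C1 x (ht ▸ hx)])
      rw [hf, goRS]
    · have hPv0 : P v0 = false :=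
        dropWhile_cons_head_false (hv_def.symm.trans hv)
      have hv0t : v0 ∈ t := by rw [← hsplit, hv]; simp
      have hv0le : ∀ x ∈ v', v0 ≤ x := by
        have := List.pairwise_cons.mp (hv ▸ pv)
        exact this.1
      -- not-covered at the boundary: nothing h/u-side can be a prefix of v0
      have hnotv0 : ∀ a : String, a ∈ h :: u →
          PySem.Str.startswith v0 (a ++ "/") = false := by
        intro a ha
        have hPv0' : PySem.Str.startswith v0 (h ++ "/") = false := hPv0
        rcases List.mem_cons.mp ha with rfl | hau
        · exact hPv0'
        · by_contra hc
          rw [Bool.not_eq_false] at hc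
          have h1 : PySem.Str.startswith a (h ++ "/") = true := hu a hau
          rw [sw_trans h1 hc] at hPv0'
          cases hPv0'
      -- C2a: v0 itself is not covered
      have C2a : covB (h :: t) v0 = false := by
        by_contra hc
        rw [Bool.not_eq_false, covB_iff] at hc
        obtain ⟨a, b, hpair, hb, hx⟩ := hc
        have hsplit' : h :: t = (h :: u) ++ v := by rw [← hsplit]; rfl
        rcases mem_pairsRS_append (v := v) (h :: u) (by rw [← hsplit']; exact hpair)
          with hin | ⟨hin, _⟩
        · have ha := (mem_of_mem_pairsRS hin).1
          have h1 : a < v0 := sw_slash_lt hx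
          have h2 : v0 ≤ a := by
            rw [hv] at ha
            rcases List.mem_cons.mp ha with rfl | ha'
            · exact le_refl _
            · exact hv0le a ha'
          exact absurd h1 (not_lt.mpr h2)
        · have := hnotv0 a hin
          rw [hx] at this; cases this
      -- C2b: on v', covered-in-(h::t) and covered-in-v agree
      have C2b : ∀ x ∈ v', covB (h :: t) x = covB v x := by
        intro x hxv'
        have hv0x : v0 ≤ x := hv0le x hxv'
        cases hc : covB v x with
        | true =>
          obtain ⟨a, b, hpair, hb, hx⟩ := (covB_iff _ _).mp hc
          refine (covB_iff _ _).mpr ⟨a, b, ?_, hb, hx⟩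
          have : h :: t = (h :: u) ++ v := by rw [← hsplit]; rfl
          rw [this]
          exact mem_pairsRS_suffix _ hpair
        | false =>
          by_contra hcc
          rw [Bool.not_eq_false, covB_iff] at hcc
          obtain ⟨a, b, hpair, hb, hx⟩ := hcc
          have hsplit' : h :: t = (h :: u) ++ v := by rw [← hsplit]; rfl
          rcases mem_pairsRS_append (v := v) (h :: u) (by rw [← hsplit']; exact hpair)
            with hin | ⟨hin, hbin⟩
          · have : covB v x = true := (covB_iff _ _).mpr ⟨a, b, hin, hb, hx⟩
            rw [this] at hc; cases hc
          · -- a is h/u-side: show the impossible b position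
            have hnv0 := hnotv0 a hin
            have hltv0 : v0 < a ++ "/" := by
              by_contra hge
              have hge' : a ++ "/" ≤ v0 := not_lt.mp hge
              have := sw_convex (a ++ "/") (sw_refl (a ++ "/")) hx hge' hv0x
              rw [this] at hnv0; cases hnv0
            have hble : a ++ "/" ≤ b := sw_le hb
            have hv0b : v0 < b := lt_of_lt_of_le hltv0 hble
            rcases hbin with hbw | hbt
            · -- b ∈ h :: u, so b ≤ v0: contradiction
              have : b ≤ v0 := by
                rcases List.mem_cons.mp hbw with rfl | hbu
                · exact h_le v0 hv0t
                · exact huv b hbu v0 (by rw [hv]; exact List.mem_cons_self)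
              exact absurd hv0b (not_lt.mpr this)
            · rw [hv] at hbt
              simp at hbt
              rw [hbt] at hv0b
              exact absurd hv0b (lt_irrefl _)
      -- assemble via the induction hypothesis on v
      have hlenv : (v0 :: v').length ≤ n := by
        have h1 : v.length ≤ t.length := hv_def ▸ List.length_dropWhile_le _ t
        rw [hv] at h1
        simp at hlen
        omega
      have hIH := ih v0 v' hlenv (hv ▸ pv)
      have hgo : goRS (h :: t) = h :: goRS v := by rw [goRS]
      rw [hgo, hv, hIH]
      have ht' : t = u ++ v0 :: v' := by rw [← hsplit, hv]
      have e1 := congrArg (List.filter (fun x => !covB (h :: t) x)) ht'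
      rw [e1, List.filter_append, List.filter_cons]
      have e2 : List.filter (fun x => !covB (h :: t) x) u = [] :=
        List.filter_eq_nil_iff.mpr (fun x hx => by simp [C1 x hx])
      rw [e2, if_pos (by simp [C2a]), List.nil_append]
      refine congrArg (List.cons h) (congrArg (List.cons v0)
        (Eq.symm (List.filter_congr fun x hx => ?_)))
      have hcx := C2b x hx
      rw [hv] at hcx
      simp [hcx]

-- ===== VERDICT (by name: the statement is the Claim_ definition above) =====
theorem removeSubfolders_spec : Claim_equal_removeSubfolders := by
  unfold Claim_equal_removeSubfolders
  intro folder _ hpre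
  unfold Spec_removeSubfolders removeSubfolders removeSubfolders_alt
  have hs : PySem.List.sorted folder (fun x => x) false ≠ [] := by
    intro h
    have := PySem.List.length_sorted folder (fun x => x) false
    rw [h] at this
    exact hpre (List.eq_nil_of_length_eq_zero this.symm)
  obtain ⟨h, t, hst⟩ := List.exists_cons_of_ne_nil hs
  have hpw : (h :: t).Pairwise (· ≤ ·) := by
    have := PySem.List.sorted_pairwise folder (fun x => x)
    rw [hst] at this
    exact this
  simp only [hst]
  rw [PySem.List.foldl_pyRange_pyGetD' (h :: t) "" aStep [PySem.List.pyGetD (h :: t) 0 ""]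
      (a := 1) (by omega)]
  simp only [PySem.List.pyGetD_zero_cons, Int.toNat_one, List.drop_one, List.tail_cons]
  rw [show [h] = ([] : List String) ++ [h] from rfl, foldl_aStep t [] h, aExtra_eq_go t h]
  have := go_eq_filter (h :: t).length h t (le_refl _) hpw
  rw [goRS] at this
  simp only [List.nil_append, List.cons_append]
  rw [this]
  rfl
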